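-- pv_equiv track=rewrite | github.com/kitao/pyxel | python/pyxel/gems/bgm_generator.py | _length_units_to_tokens
-- ===== SOURCE A (Python) =====
-- from typing import Dict, List, Optional, Sequence, Tuple
--
-- def _length_units_to_tokens(units: int) -> List[str]:
--     table = [
--         (16, "1"),
--         (12, "2."),
--         (8, "2"),
--         (6, "4."),
--         (4, "4"),
--         (3, "8."),
--         (2, "8"),
--         (1, "16"),
--     ]
--     tokens: List[str] = []
--     remaining = units
--     for u, token in table:
--         while remaining >= u:
--             tokens.append(token)
--             remaining -= u
--         if remaining == 0:
--             break
--     return tokens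
-- ===== SOURCE B (Python) =====
-- from typing import List
--
-- # Remainder lookup: _REM[r] is the token decomposition of r length units for 0 <= r < 16.
-- _REM = [
--     [], ["16"], ["8"], ["8."], ["4"], ["4", "16"], ["4."], ["4.", "16"],
--     ["2"], ["2", "16"], ["2", "8"], ["2", "8."], ["2."], ["2.", "16"], ["2.", "8"], ["2.", "8."],
-- ]
--
-- def _length_units_to_tokens(units: int) -> List[str]:
--     if units <= 0:
--         return []
--     q, r = divmod(units, 16)
--     return ["1"] * q + _REM[r]
-- ===== Notes on version B (the rewrite author's own statement) =====
-- stated objective: alternative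
-- what changed: Replaced the greedy loop over the (unit, token) table with a single whole-note divmod plus a precomputed lookup table mapping each possible remainder to its token list.
import Mathlib
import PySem

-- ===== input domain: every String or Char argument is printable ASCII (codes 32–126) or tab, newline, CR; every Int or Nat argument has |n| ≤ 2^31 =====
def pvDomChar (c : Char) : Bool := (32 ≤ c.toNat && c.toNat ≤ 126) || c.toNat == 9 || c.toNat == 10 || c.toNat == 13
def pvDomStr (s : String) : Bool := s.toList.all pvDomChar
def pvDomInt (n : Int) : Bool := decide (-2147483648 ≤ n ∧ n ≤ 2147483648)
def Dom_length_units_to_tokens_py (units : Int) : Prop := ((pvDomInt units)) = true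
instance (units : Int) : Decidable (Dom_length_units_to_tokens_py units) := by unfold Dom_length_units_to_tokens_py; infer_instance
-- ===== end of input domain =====

-- B drops A's greedy loop over the unit table entirely: one divmod by 16 plus a
-- precomputed 16-entry lookup table for the remainder's token list.

-- ===== PORT A =====
-- the note-duration table of A
def pvTable : List (Int × String) :=
  [(16, "1"), (12, "2."), (8, "2"), (6, "4."), (4, "4"), (3, "8."), (2, "8"), (1, "16")]

-- inner 'while remaining >= u: tokens.append(token); remaining -= u'
-- (the 'u ≤ 0' branch is a totality guard only: every unit in pvTable is positive)
def pvWhileA (u : Int) (token : String) (tokens : List String) (remaining : Int) :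
    List String × Int :=
  if u ≤ 0 then (tokens, remaining)
  else if remaining ≥ u then pvWhileA u token (tokens ++ [token]) (remaining - u)
  else (tokens, remaining)
termination_by remaining.toNat
decreasing_by omega

-- 'for u, token in table: … ; if remaining == 0: break'
def pvLoopA : List (Int × String) → List String → Int → List String
  | [], tokens, _ => tokens
  | (u, token) :: rest, tokens, remaining =>
    let p := pvWhileA u token tokens remaining
    if p.2 = 0 then p.1 else pvLoopA rest p.1 p.2

def length_units_to_tokens_py (units : Int) : List String := pvLoopA pvTable [] units

-- ===== PORT B =====
-- _REM[r]: the token decomposition of r units, 0 <= r < 16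
def pvRem : List (List String) :=
  [[], ["16"], ["8"], ["8."], ["4"], ["4", "16"], ["4."], ["4.", "16"],
   ["2"], ["2", "16"], ["2", "8"], ["2", "8."], ["2."], ["2.", "16"], ["2.", "8"], ["2.", "8."]]

-- 'q, r = divmod(units, 16); return ["1"] * q + _REM[r]'
-- (.getD [] is a totality guard only: r = units % 16 is always a valid index 0..15)
def length_units_to_tokens_py_alt (units : Int) : List String :=
  if units ≤ 0 then []
  else
    List.replicate (PySem.Int.floordiv units 16).toNat "1" ++
      (PySem.List.pyGet? pvRem (PySem.Int.mod units 16)).getD []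

-- ===== PRECONDITION & SPEC =====
def Spec_length_units_to_tokens_py (units : Int) (out : List String) : Prop := out = length_units_to_tokens_py_alt units
instance (units : Int) (out : List String) : Decidable (Spec_length_units_to_tokens_py units out) := by unfold Spec_length_units_to_tokens_py; infer_instance

-- ===== CLAIM (what is proved, stated in full; the proofs are below) =====
def Claim_equal_length_units_to_tokens_py : Prop := ∀ (units : Int), Dom_length_units_to_tokens_py units → Spec_length_units_to_tokens_py units (length_units_to_tokens_py units)

-- ===== LEMMAS AND PROOFS =====

-- closed-form (structural, kernel-evaluable) rendering of A's loop, used only in the proofs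
def pvEval : List (Int × String) → Int → List String
  | [], _ => []
  | (u, t) :: rest, r =>
    let q := (PySem.Int.floordiv r u).toNat
    let r' := PySem.Int.mod r u
    if r' = 0 then List.replicate q t else List.replicate q t ++ pvEval rest r'

-- the while-loop is append-replicate(quotient) with the remainder passed on
theorem pvWhileA_eq_aux (u : Int) (hu : 0 < u) (token : String) :
    ∀ (fuel : Nat) (tokens : List String) (remaining : Int), 0 ≤ remaining →
      remaining.toNat ≤ fuel →
      pvWhileA u token tokens remaining =
        (tokens ++ List.replicate (remaining / u).toNat token, remaining % u) := by
  intro fuel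
  induction fuel with
  | zero =>
    intro tokens remaining hr hf
    have h0 : remaining = 0 := by omega
    subst h0
    rw [pvWhileA]
    rw [if_neg (by omega : ¬ u ≤ 0), if_neg (by omega : ¬ (0 : Int) ≥ u)]
    simp
  | succ n ih =>
    intro tokens remaining hr hf
    rw [pvWhileA]
    rw [if_neg (by omega : ¬ u ≤ 0)]
    by_cases hge : remaining ≥ u
    · rw [if_pos hge]
      rw [ih (tokens ++ [token]) (remaining - u) (by omega) (by omega)]
      have hq : remaining / u = (remaining - u) / u + 1 := by
        have := Int.add_mul_ediv_right (remaining - u) 1 (by omega : u ≠ 0)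
        simpa using this
      have hm : (remaining - u) % u = remaining % u := Int.sub_emod_right remaining u
      have hqn : 0 ≤ (remaining - u) / u := Int.ediv_nonneg (by omega) (by omega)
      have ht : (remaining / u).toNat = ((remaining - u) / u).toNat + 1 := by
        rw [hq]; omega
      rw [hm, ht, List.replicate_succ, List.append_assoc]
      rfl
    · rw [if_neg hge]
      have h1 : remaining / u = 0 := Int.ediv_eq_zero_of_lt hr (by omega)
      have h2 : remaining % u = remaining := Int.emod_eq_of_lt hr (by omega)
      simp [h1, h2]

theorem pvWhileA_eq (u : Int) (hu : 0 < u) (token : String) (tokens : List String)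
    (remaining : Int) (hr : 0 ≤ remaining) :
    pvWhileA u token tokens remaining =
      (tokens ++ List.replicate (PySem.Int.floordiv remaining u).toNat token,
       PySem.Int.mod remaining u) := by
  rw [PySem.Int.floordiv_eq_ediv_of_pos hu, PySem.Int.mod_eq_emod_of_pos hu]
  exact pvWhileA_eq_aux u hu token remaining.toNat tokens remaining hr le_rfl

-- A's loop equals tokens ++ pvEval
theorem pvLoopA_eval (table : List (Int × String)) (hpos : ∀ p ∈ table, 0 < p.1)
    (tokens : List String) (remaining : Int) (hr : 0 ≤ remaining) :
    pvLoopA table tokens remaining = tokens ++ pvEval table remaining := by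
  induction table generalizing tokens remaining with
  | nil => simp [pvLoopA, pvEval]
  | cons p rest ih =>
    obtain ⟨u, token⟩ := p
    have hu : 0 < u := hpos (u, token) (by simp)
    simp only [pvLoopA, pvEval, pvWhileA_eq u hu token tokens remaining hr]
    by_cases h0 : PySem.Int.mod remaining u = 0
    · simp [h0]
    · simp only [if_neg h0]
      rw [ih (fun q hq => hpos q (by simp [hq])) _ _ (PySem.Int.mod_nonneg remaining hu),
        List.append_assoc]

theorem pvLoopA_nonpos (table : List (Int × String)) (hpos : ∀ p ∈ table, 0 < p.1)
    (tokens : List String) (remaining : Int) (hr : remaining ≤ 0) :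
    pvLoopA table tokens remaining = tokens := by
  induction table generalizing tokens with
  | nil => rfl
  | cons p rest ih =>
    obtain ⟨u, token⟩ := p
    have hu : 0 < u := hpos (u, token) (by simp)
    have hw : pvWhileA u token tokens remaining = (tokens, remaining) := by
      rw [pvWhileA]
      rw [if_neg (by omega : ¬ u ≤ 0), if_neg (by omega : ¬ remaining ≥ u)]
    simp only [pvLoopA, hw]
    by_cases h0 : remaining = 0
    · simp [h0]
    · simp only [if_neg h0]
      exact ih (fun q hq => hpos q (by simp [hq])) tokens

-- for every remainder r in 0..15, the tail of A's greedy evaluation equals B's table entry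
theorem pvEval_rest_eq (r : Int) (h0 : 0 ≤ r) (h16 : r < 16) :
    pvEval (pvTable.tail) r = (PySem.List.pyGet? pvRem r).getD [] := by
  interval_cases r <;> decide

-- ===== VERDICT (by name: the statement is the Claim_ definition above) =====
theorem length_units_to_tokens_py_spec : Claim_equal_length_units_to_tokens_py := by
  intro units _
  unfold Spec_length_units_to_tokens_py length_units_to_tokens_py length_units_to_tokens_py_alt
  have hpos : ∀ p ∈ pvTable, 0 < p.1 := by decide
  by_cases h : units ≤ 0
  · rw [if_pos h]
    exact pvLoopA_nonpos pvTable hpos [] units h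
  · rw [if_neg h]
    rw [pvLoopA_eval pvTable hpos [] units (by omega)]
    show pvEval pvTable units = _
    rw [show pvEval pvTable units =
          (if PySem.Int.mod units 16 = 0 then
            List.replicate (PySem.Int.floordiv units 16).toNat "1"
          else
            List.replicate (PySem.Int.floordiv units 16).toNat "1" ++
              pvEval pvTable.tail (PySem.Int.mod units 16)) from rfl]
    have h16 : (0:Int) < 16 := by norm_num
    have hr0 : 0 ≤ PySem.Int.mod units 16 := PySem.Int.mod_nonneg units h16
    have hr16 : PySem.Int.mod units 16 < 16 := PySem.Int.mod_lt units h16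
    by_cases hz : PySem.Int.mod units 16 = 0
    · rw [if_pos hz, hz]
      have : (PySem.List.pyGet? pvRem 0).getD [] = ([] : List String) := by decide
      rw [this, List.append_nil]
    · rw [if_neg hz]
      rw [pvEval_rest_eq _ hr0 hr16]
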